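-- pv_equiv track=rewrite | github.com/JimMadge/Advent-of-Code-2020 | adventofcode/day12.py | turn2
-- ===== SOURCE A (Python) =====
-- def turn2(waypoint, direction, degrees):
--     n_turns = degrees // 90
--
--     for i in range(n_turns):
--         if direction == "L":
--             waypoint = (waypoint[1], -waypoint[0])
--         if direction == "R":
--             waypoint = (-waypoint[1], waypoint[0])
--
--     return waypoint
-- ===== SOURCE B (Python) =====
-- def turn2(waypoint, direction, degrees):
--     n_turns = degrees // 90
--     r = n_turns % 4 if n_turns > 0 else 0
--     x, y = waypoint
--     if direction == "L":
--         if r == 1: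
--             return (y, -x)
--         if r == 2:
--             return (-x, -y)
--         if r == 3:
--             return (-y, x)
--         return (x, y)
--     if direction == "R":
--         if r == 1:
--             return (-y, x)
--         if r == 2:
--             return (-x, -y)
--         if r == 3:
--             return (y, -x)
--         return (x, y)
--     return waypoint
-- ===== Notes on version B (the rewrite author's own statement) =====
-- stated objective: faster
-- what changed: Replaced the degrees//90-iteration loop with a closed-form period-4 lookup on (degrees//90) mod 4 (with mod forced to 0 for non-positive turn counts, matching the empty range).
import Mathlib
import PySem

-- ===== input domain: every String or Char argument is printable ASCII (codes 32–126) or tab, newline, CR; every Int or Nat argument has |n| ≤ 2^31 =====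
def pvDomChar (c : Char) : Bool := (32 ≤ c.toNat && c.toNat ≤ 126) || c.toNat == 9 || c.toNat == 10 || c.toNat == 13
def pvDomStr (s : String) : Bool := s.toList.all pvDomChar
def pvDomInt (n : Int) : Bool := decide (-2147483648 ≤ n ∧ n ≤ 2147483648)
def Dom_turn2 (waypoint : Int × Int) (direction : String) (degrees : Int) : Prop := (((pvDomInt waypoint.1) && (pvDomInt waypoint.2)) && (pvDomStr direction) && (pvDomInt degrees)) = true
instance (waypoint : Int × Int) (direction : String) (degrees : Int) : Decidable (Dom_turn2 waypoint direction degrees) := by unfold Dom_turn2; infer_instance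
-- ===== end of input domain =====

-- B replaces A's repeat-(degrees//90)-times rotation loop by a single period-4 lookup (objective: faster).

-- ===== PORT A =====
def turn2 (waypoint : Int × Int) (direction : String) (degrees : Int) : Int × Int :=
  let n_turns := PySem.Int.floordiv degrees 90
  (PySem.List.pyRange 0 n_turns 1).foldl
    (fun wp _ =>
      let wp := if direction = "L" then (wp.2, -wp.1) else wp
      if direction = "R" then (-wp.2, wp.1) else wp)
    waypoint

-- ===== PORT B =====
def turn2_alt (waypoint : Int × Int) (direction : String) (degrees : Int) : Int × Int :=
  let n_turns := PySem.Int.floordiv degrees 90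
  let r : Int := if 0 < n_turns then PySem.Int.mod n_turns 4 else 0
  let x := waypoint.1
  let y := waypoint.2
  if direction = "L" then
    if r = 1 then (y, -x)
    else if r = 2 then (-x, -y)
    else if r = 3 then (-y, x)
    else (x, y)
  else if direction = "R" then
    if r = 1 then (-y, x)
    else if r = 2 then (-x, -y)
    else if r = 3 then (y, -x)
    else (x, y)
  else waypoint

-- ===== PRECONDITION & SPEC =====
def Spec_turn2 (waypoint : Int × Int) (direction : String) (degrees : Int) (out : Int × Int) : Prop := out = turn2_alt waypoint direction degrees
instance (waypoint : Int × Int) (direction : String) (degrees : Int) (out : Int × Int) : Decidable (Spec_turn2 waypoint direction degrees out) := by unfold Spec_turn2; infer_instance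

-- ===== CLAIM (what is proved, stated in full; the proofs are below) =====
def Claim_equal_turn2 : Prop := ∀ (waypoint : Int × Int) (direction : String) (degrees : Int), Dom_turn2 waypoint direction degrees → Spec_turn2 waypoint direction degrees (turn2 waypoint direction degrees)

-- ===== LEMMAS AND PROOFS =====

-- folding a function that ignores the list elements is iteration
theorem pv_foldl_ignore {α β : Type} (f : α → α) (l : List β) (a : α) :
    l.foldl (fun x _ => f x) a = f^[l.length] a := by
  induction l generalizing a with
  | nil => rfl
  | cons b t ih => simp [List.foldl_cons, ih, Function.iterate_succ_apply]

def pvStepL (p : Int × Int) : Int × Int := (p.2, -p.1)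
def pvStepR (p : Int × Int) : Int × Int := (-p.2, p.1)

theorem pv_iterL (k : Nat) (x y : Int) :
    pvStepL^[k] (x, y) =
      if k % 4 = 1 then (y, -x)
      else if k % 4 = 2 then (-x, -y)
      else if k % 4 = 3 then (-y, x)
      else (x, y) := by
  induction k with
  | zero => simp
  | succ k ih =>
    rw [Function.iterate_succ_apply', ih]
    have h4 : k % 4 = 0 ∨ k % 4 = 1 ∨ k % 4 = 2 ∨ k % 4 = 3 := by omega
    rcases h4 with h | h | h | h
    · have h' : (k + 1) % 4 = 1 := by omega
      simp [h, h', pvStepL]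
    · have h' : (k + 1) % 4 = 2 := by omega
      simp [h, h', pvStepL]
    · have h' : (k + 1) % 4 = 3 := by omega
      simp [h, h', pvStepL]
    · have h' : (k + 1) % 4 = 0 := by omega
      simp [h, h', pvStepL]

theorem pv_iterR (k : Nat) (x y : Int) :
    pvStepR^[k] (x, y) =
      if k % 4 = 1 then (-y, x)
      else if k % 4 = 2 then (-x, -y)
      else if k % 4 = 3 then (y, -x)
      else (x, y) := by
  induction k with
  | zero => simp
  | succ k ih =>
    rw [Function.iterate_succ_apply', ih]
    have h4 : k % 4 = 0 ∨ k % 4 = 1 ∨ k % 4 = 2 ∨ k % 4 = 3 := by omega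
    rcases h4 with h | h | h | h
    · have h' : (k + 1) % 4 = 1 := by omega
      simp [h, h', pvStepR]
    · have h' : (k + 1) % 4 = 2 := by omega
      simp [h, h', pvStepR]
    · have h' : (k + 1) % 4 = 3 := by omega
      simp [h, h', pvStepR]
    · have h' : (k + 1) % 4 = 0 := by omega
      simp [h, h', pvStepR]

-- the r computed by B equals (length of A's range) % 4, as an Int relation
theorem pv_r_eq (n : Int) :
    (if 0 < n then PySem.Int.mod n 4 else 0) = ((n.toNat % 4 : Nat) : Int) := by
  by_cases h : 0 < n
  · rw [if_pos h, PySem.Int.mod_eq_emod_of_pos (by norm_num)]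
    omega
  · rw [if_neg h]
    omega

-- ===== VERDICT (by name: the statement is the Claim_ definition above) =====
theorem turn2_spec : Claim_equal_turn2 := by
  intro waypoint direction degrees _
  obtain ⟨x, y⟩ := waypoint
  unfold Spec_turn2 turn2 turn2_alt
  simp only []
  generalize PySem.Int.floordiv degrees 90 = n
  rw [pv_r_eq]
  by_cases hL : direction = "L"
  · simp only [hL, eq_false (show ¬ ("L" : String) = "R" from by decide), ite_true, ite_false]
    have hf := pv_foldl_ignore pvStepL (PySem.List.pyRange 0 n 1) (x, y)
    simp only [pvStepL] at hf
    rw [hf, PySem.List.length_pyRange_one,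
      (show ((n : Int) - 0).toNat = n.toNat by omega), pv_iterL]
    rcases (show n.toNat % 4 = 0 ∨ n.toNat % 4 = 1 ∨ n.toNat % 4 = 2 ∨ n.toNat % 4 = 3 by omega)
      with h | h | h | h <;> simp [h]
  · by_cases hR : direction = "R"
    · simp only [hR, eq_false (show ¬ ("R" : String) = "L" from by decide), ite_true, ite_false]
      have hf := pv_foldl_ignore pvStepR (PySem.List.pyRange 0 n 1) (x, y)
      simp only [pvStepR] at hf
      rw [hf, PySem.List.length_pyRange_one,
        (show ((n : Int) - 0).toNat = n.toNat by omega), pv_iterR]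
      rcases (show n.toNat % 4 = 0 ∨ n.toNat % 4 = 1 ∨ n.toNat % 4 = 2 ∨ n.toNat % 4 = 3 by omega)
        with h | h | h | h <;> simp [h]
    · simp only [if_neg hL, if_neg hR]
      induction (PySem.List.pyRange 0 n 1) with
      | nil => rfl
      | cons a t ih => simp only [List.foldl_cons]; exact ih
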